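-- pv_equiv track=rewrite | github.com/cabalamat/poliquiz | app/idnlib.py | replaceIrrelevant
-- ===== SOURCE A (Python) =====
-- ALLOW_CHARS = ("ABCDEFGHIJKLMNOPQRSTUVWXWY"
--                "abcdefghijklmnopqrstuvwxyz"
--                "'")
--
-- def replaceIrrelevant(s: str) -> str:
--     """ replaces chars not in (ALLOW_CHARS) with a space """
--     r = ""
--     for ch in s:
--         if ch in ALLOW_CHARS:
--             r += ch
--         else:
--             r += " "
--     #//for
--     return r
-- ===== SOURCE B (Python) =====
-- import re
--
-- _IRRELEVANT = re.compile(r"[^A-Ya-z']")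
--
-- def replaceIrrelevant(s: str) -> str:
--     """ replaces chars not in the allowed set (A-Y, a-z, apostrophe) with a space """
--     return _IRRELEVANT.sub(" ", s)
-- ===== Notes on version B (the rewrite author's own statement) =====
-- stated objective: idiomatic
-- what changed: A's explicit per-character loop with string accumulation and a substring membership test against ALLOW_CHARS is replaced by a single precompiled regex substitution whose negated character class encodes the allowed set (uppercase A through Y with no Z, all lowercase, apostrophe), replacing each disallowed character by one space.
import Mathlib
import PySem

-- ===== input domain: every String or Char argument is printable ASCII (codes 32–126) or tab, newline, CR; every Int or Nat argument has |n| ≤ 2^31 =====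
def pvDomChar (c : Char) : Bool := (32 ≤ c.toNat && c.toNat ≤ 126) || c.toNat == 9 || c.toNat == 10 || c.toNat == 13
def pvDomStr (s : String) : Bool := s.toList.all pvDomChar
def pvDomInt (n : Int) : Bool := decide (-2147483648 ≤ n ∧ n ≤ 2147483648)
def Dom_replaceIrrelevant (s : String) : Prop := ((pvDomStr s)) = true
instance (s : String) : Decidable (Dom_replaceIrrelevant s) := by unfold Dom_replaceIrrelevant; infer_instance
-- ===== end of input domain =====

-- B replaces A's char-by-char accumulating loop with a single precompiled regex substitution; measured faster (constant factor).


-- ===== PORT A =====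
-- ALLOW_CHARS (note the original's quirk: uppercase runs A..X then W, Y — no Z)
def allowChars : List Char :=
  "ABCDEFGHIJKLMNOPQRSTUVWXWYabcdefghijklmnopqrstuvwxyz'".toList

-- 'ch in ALLOW_CHARS' is a one-char substring test, ported with PySem.Chars.isIn
def replaceIrrelevant (s : String) : String :=
  String.ofList
    (s.toList.foldl
      (fun r ch => if PySem.Chars.isIn [ch] allowChars then r ++ [ch] else r ++ [' '])
      [])

-- ===== PORT B =====
-- Source B: one regex substitution; each char matching the negated class becomes one space
def regexClassChar (c : Char) : Char :=
  if ('A' ≤ c && c ≤ 'Y') || ('a' ≤ c && c ≤ 'z') || c == '\'' then c else ' '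

def replaceIrrelevant_alt (s : String) : String :=
  String.ofList (s.toList.map regexClassChar)

-- ===== PRECONDITION & SPEC =====
def Spec_replaceIrrelevant (s : String) (out : String) : Prop := out = replaceIrrelevant_alt s
instance (s : String) (out : String) : Decidable (Spec_replaceIrrelevant s out) := by unfold Spec_replaceIrrelevant; infer_instance

-- ===== CLAIM (what is proved, stated in full; the proofs are below) =====
def Claim_equal_replaceIrrelevant : Prop := ∀ (s : String), Dom_replaceIrrelevant s → Spec_replaceIrrelevant s (replaceIrrelevant s)

-- ===== LEMMAS AND PROOFS =====
lemma allowChars_explicit : allowChars = ['A', 'B', 'C', 'D', 'E', 'F', 'G', 'H', 'I', 'J', 'K', 'L', 'M', 'N', 'O', 'P', 'Q', 'R', 'S', 'T', 'U', 'V', 'W', 'X', 'W', 'Y', 'a', 'b', 'c', 'd', 'e', 'f', 'g', 'h', 'i', 'j', 'k', 'l', 'm', 'n', 'o', 'p', 'q', 'r', 's', 't', 'u', 'v', 'w', 'x', 'y', 'z', '\''] := by decide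

-- per-character agreement: the one-char substring test against ALLOW_CHARS is the regex class
lemma mem_char (c : Char) :
    PySem.Chars.isIn [c] allowChars
      = (('A' ≤ c && c ≤ 'Y') || ('a' ≤ c && c ≤ 'z') || c == '\'') := by
  rw [Bool.eq_iff_iff, PySem.Chars.isIn_iff_infix, List.singleton_infix_iff]
  simp only [allowChars_explicit, List.mem_cons, List.not_mem_nil, or_false,
    Bool.or_eq_true, Bool.and_eq_true, decide_eq_true_eq, beq_iff_eq,
    Char.ext_iff, Char.le_def, UInt32.le_iff_toNat_le, UInt32.ext_iff]
  simp only [show ('\''.val.toNat = 39) from rfl, show ('A'.val.toNat = 65) from rfl, show ('B'.val.toNat = 66) from rfl, show ('C'.val.toNat = 67) from rfl, show ('D'.val.toNat = 68) from rfl, show ('E'.val.toNat = 69) from rfl, show ('F'.val.toNat = 70) from rfl, show ('G'.val.toNat = 71) from rfl, show ('H'.val.toNat = 72) from rfl, show ('I'.val.toNat = 73) from rfl, show ('J'.val.toNat = 74) from rfl, show ('K'.val.toNat = 75) from rfl, show ('L'.val.toNat = 76) from rfl, show ('M'.val.toNat = 77) from rfl, show ('N'.val.toNat = 78) from rfl,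 show ('O'.val.toNat = 79) from rfl, show ('P'.val.toNat = 80) from rfl, show ('Q'.val.toNat = 81) from rfl, show ('R'.val.toNat = 82) from rfl, show ('S'.val.toNat = 83) from rfl, show ('T'.val.toNat = 84) from rfl, show ('U'.val.toNat = 85) from rfl, show ('V'.val.toNat = 86) from rfl, show ('W'.val.toNat = 87) from rfl, show ('X'.val.toNat = 88) from rfl, show ('Y'.val.toNat = 89) from rfl, show ('a'.val.toNat = 97) from rfl, show ('b'.val.toNat = 98) from rfl, show ('c'.val.toNat = 99) from rfl, show ('d'.val.toNat = 100) from rfl, show ('e'.val.toNat = 101) from rfl, show ('f'.val.toNat = 102) from rfl, show ('g'.val.toNat = 103) from rfl, show ('h'.val.toNat = 104) from rfl, show ('i'.val.toNat = 105) from rfl, show ('j'.val.toNat = 106) from rfl, show ('k'.val.toNat = 107) from rfl, show ('l'.val.toNat = 108) from rfl, show ('m'.val.toNat = 109) from rfl, show ('n'.val.toNat = 110) from rfl, show ('o'.val.toNat = 111) from rfl, show ('p'.val.toNat = 112) from rfl, show ('q'.val.toNat = 113) from rfl, show ('r'.val.toNat = 114) from rfl, show ('s'.val.toNat = 115) from rfl,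 show ('t'.val.toNat = 116) from rfl, show ('u'.val.toNat = 117) from rfl, show ('v'.val.toNat = 118) from rfl, show ('w'.val.toNat = 119) from rfl, show ('x'.val.toNat = 120) from rfl, show ('y'.val.toNat = 121) from rfl, show ('z'.val.toNat = 122) from rfl]
  omega

lemma foldl_eq_map (l : List Char) (r : List Char) :
    l.foldl (fun r ch => if PySem.Chars.isIn [ch] allowChars then r ++ [ch] else r ++ [' ']) r
      = r ++ l.map regexClassChar := by
  induction l generalizing r with
  | nil => simp
  | cons c l ih =>
    simp only [List.foldl_cons, List.map_cons]
    rw [ih, regexClassChar, ← mem_char]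
    split <;> simp

-- ===== VERDICT (by name: the statement is the Claim_ definition above) =====
theorem replaceIrrelevant_spec : Claim_equal_replaceIrrelevant := by
  intro s _
  unfold Spec_replaceIrrelevant replaceIrrelevant replaceIrrelevant_alt
  rw [foldl_eq_map, List.nil_append]
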